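-- pv_equiv track=rewrite | github.com/MarkShinozaki/CPTS355 | Lab 3/Lab3.py | mostCases
-- ===== SOURCE A (Python) =====
-- from functools import reduce
--
-- def getMonthlyCases(data):
--     mylog = {}
--     for county,log in data.items():
--         for month,count in log.items():
--             if month not in mylog:
--                 mylog[month] = {}
--             mylog[month][county] = count
--     return mylog
--
-- def mostCases(data):
--     monthly_cases = getMonthlyCases(data)
--     max_month = ''
--     max_count = 0
--     for month,log in monthly_cases.items():
--         total_cases = reduce(lambda x,y: x+y, log.values())
--         if total_cases > max_count:
--             max_count = total_cases
--             max_month = month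
--     return (max_month, max_count)
-- ===== SOURCE B (Python) =====
-- def mostCases(data):
--     month_totals = {}
--     for county, log in data.items():
--         for month, count in log.items():
--             month_totals[month] = month_totals.get(month, 0) + count
--     max_month = ''
--     max_count = 0
--     for month, total in month_totals.items():
--         if total > max_count:
--             max_month = month
--             max_count = total
--     return (max_month, max_count)
-- ===== Notes on version B (the rewrite author's own statement) =====
-- stated objective: faster
-- what changed: Replaces the month->county transpose dict-of-dicts plus functools.reduce per month with a single flat month->total dict built in one pass, then a plain max-tracking loop (no intermediate per-county dicts, no reduce).
import Mathlib
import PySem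

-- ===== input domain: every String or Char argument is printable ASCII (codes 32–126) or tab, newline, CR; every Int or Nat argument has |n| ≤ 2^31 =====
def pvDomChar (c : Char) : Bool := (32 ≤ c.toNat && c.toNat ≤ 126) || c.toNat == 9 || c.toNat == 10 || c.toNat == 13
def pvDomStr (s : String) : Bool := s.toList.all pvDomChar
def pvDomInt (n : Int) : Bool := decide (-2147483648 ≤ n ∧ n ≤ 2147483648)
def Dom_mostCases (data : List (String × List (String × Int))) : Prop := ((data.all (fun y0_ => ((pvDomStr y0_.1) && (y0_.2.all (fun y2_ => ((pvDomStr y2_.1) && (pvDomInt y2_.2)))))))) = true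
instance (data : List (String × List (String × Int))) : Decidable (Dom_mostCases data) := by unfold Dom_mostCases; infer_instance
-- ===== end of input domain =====

-- B drops A's month→{county:count} transpose and per-month reduce, accumulating a flat month→total dict in one pass, then taking the max in a second loop (measured faster in a timing run); return values proved equal on duplicate-free association lists.


-- ===== PORT A =====
-- functools.reduce(lambda x,y: x+y, vs); vs = [] would raise TypeError in Python (unreachable here: month dicts are never empty)
def pvReduceAdd (vs : List Int) : Int :=
  match vs with
  | [] => 0
  | v :: rest => rest.foldl (fun x y => x + y) v

def getMonthlyCases (data : List (String × List (String × Int))) : PySem.Dict String (PySem.Dict String Int) :=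
  data.foldl (fun mylog p =>
    p.2.foldl (fun mylog q =>
      (if mylog.contains q.1 then mylog else mylog.insert q.1 PySem.Dict.empty).modify q.1
        PySem.Dict.empty (fun d => d.insert p.1 q.2)) mylog) PySem.Dict.empty

def mostCases (data : List (String × List (String × Int))) : String × Int :=
  let monthly_cases := getMonthlyCases data
  monthly_cases.items.foldl (fun acc p =>
    let total_cases := pvReduceAdd p.2.values
    if total_cases > acc.2 then (p.1, total_cases) else acc) ("", 0)

-- ===== PORT B =====
def mostCases_alt (data : List (String × List (String × Int))) : String × Int :=
  let month_totals := data.foldl (fun t p =>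
    p.2.foldl (fun t q => t.insert q.1 (t.getD q.1 0 + q.2)) t)
    (PySem.Dict.empty : PySem.Dict String Int)
  month_totals.items.foldl (fun acc p => if p.2 > acc.2 then (p.1, p.2) else acc) ("", 0)

-- ===== PRECONDITION & SPEC =====
-- Pre_ excludes association lists with a duplicate county key or a duplicate month key inside one
-- county: such lists encode no Python dict input (Python collapses the duplicates before either
-- function runs), and on them A's last-write-wins transpose and B's summation are both accidental.
def Pre_mostCases (data : List (String × List (String × Int))) : Prop :=
  (data.map Prod.fst).Nodup ∧ ∀ p ∈ data, (p.2.map Prod.fst).Nodup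
instance (data : List (String × List (String × Int))) : Decidable (Pre_mostCases data) := by
  unfold Pre_mostCases; infer_instance

def pvWitness_mostCases : (List (String × List (String × Int))) :=
  [("A", [("jan", 3), ("feb", 1)]), ("B", [("jan", 2)])]

def Spec_mostCases (data : List (String × List (String × Int))) (out : String × Int) : Prop := out = mostCases_alt data
instance (data : List (String × List (String × Int))) (out : String × Int) : Decidable (Spec_mostCases data out) := by unfold Spec_mostCases; infer_instance

-- ===== CLAIM (what is proved, stated in full; the proofs are below) =====
def Claim_equal_mostCases : Prop := ∀ (data : List (String × List (String × Int))), Dom_mostCases data → Pre_mostCases data → Spec_mostCases data (mostCases data)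

-- ===== LEMMAS AND PROOFS =====

lemma pvReduceAdd_eq_foldl (vs : List Int) : pvReduceAdd vs = vs.foldl (· + ·) 0 := by
  cases vs with
  | nil => rfl
  | cons v rest => simp [pvReduceAdd, List.foldl]

-- step facts for A's inner loop body
lemma stepA_getD_self (ml : PySem.Dict String (PySem.Dict String Int)) (m c : String) (cnt : Int) :
    ((if ml.contains m then ml else ml.insert m PySem.Dict.empty).modify m PySem.Dict.empty
      (fun d => d.insert c cnt)).getD m PySem.Dict.empty
      = (ml.getD m PySem.Dict.empty).insert c cnt := by
  by_cases h : ml.contains m = true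
  · simp [h, PySem.Dict.getD_modify_self]
  · have h' : ml.contains m = false := by simpa using h
    simp [h', PySem.Dict.getD_modify_self, PySem.Dict.getD_insert_self,
      PySem.Dict.getD_of_not_contains ml _ h']

lemma stepA_getD_ne (ml : PySem.Dict String (PySem.Dict String Int)) (m m' c : String) (cnt : Int)
    (hne : m' ≠ m) :
    ((if ml.contains m then ml else ml.insert m PySem.Dict.empty).modify m PySem.Dict.empty
      (fun d => d.insert c cnt)).getD m' PySem.Dict.empty
      = ml.getD m' PySem.Dict.empty := by
  by_cases h : ml.contains m = true
  · simp [h, PySem.Dict.getD_modify_of_ne _ _ _ hne]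
  · have h' : ml.contains m = false := by simpa using h
    simp [h', PySem.Dict.getD_modify_of_ne _ _ _ hne, PySem.Dict.getD_insert_of_ne _ _ _ hne]

lemma stepA_keys (ml : PySem.Dict String (PySem.Dict String Int)) (m c : String) (cnt : Int) :
    ((if ml.contains m then ml else ml.insert m PySem.Dict.empty).modify m PySem.Dict.empty
      (fun d => d.insert c cnt)).keys
      = if ml.contains m then ml.keys else ml.keys ++ [m] := by
  by_cases h : ml.contains m = true
  · rw [if_pos h, if_pos h, PySem.Dict.keys_modify, PySem.Dict.keys_insert_of_contains _ _ h]
  · have h' : ml.contains m = false := by simpa using h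
    rw [if_neg (by simp [h']), if_neg (by simp [h']), PySem.Dict.keys_modify,
      PySem.Dict.keys_insert_of_contains _ _ (PySem.Dict.contains_insert_self ml m _),
      PySem.Dict.keys_insert_of_not_contains _ _ h']

lemma sum_values_insert_fresh (d : PySem.Dict String Int) (c : String) (v : Int)
    (h : d.contains c = false) :
    ((d.insert c v).values).foldl (· + ·) 0 = d.values.foldl (· + ·) 0 + v := by
  have hit := PySem.Dict.items_insert_of_not_contains d v h
  simp only [PySem.Dict.values, hit, List.map_append, List.foldl_append, List.map_cons,
    List.map_nil, List.foldl_cons, List.foldl_nil]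

lemma inner_inv (c : String) (log : List (String × Int)) (S : String → Prop) :
    ∀ (ml : PySem.Dict String (PySem.Dict String Int)) (t : PySem.Dict String Int),
    ml.keys = t.keys →
    ml.keys.Nodup →
    (∀ m, ((ml.getD m PySem.Dict.empty).values).foldl (· + ·) 0 = t.getD m 0) →
    (∀ m k, (ml.getD m PySem.Dict.empty).contains k = true → S k ∨ k = c) →
    (log.map Prod.fst).Nodup →
    (∀ q ∈ log, (ml.getD q.1 PySem.Dict.empty).contains c = false) →
    ((log.foldl (fun ml q =>
        (if ml.contains q.1 then ml else ml.insert q.1 PySem.Dict.empty).modify q.1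
          PySem.Dict.empty (fun d => d.insert c q.2)) ml).keys
      = (log.foldl (fun t q => t.insert q.1 (t.getD q.1 0 + q.2)) t).keys ∧
     (log.foldl (fun ml q =>
        (if ml.contains q.1 then ml else ml.insert q.1 PySem.Dict.empty).modify q.1
          PySem.Dict.empty (fun d => d.insert c q.2)) ml).keys.Nodup ∧
     (∀ m, (((log.foldl (fun ml q =>
        (if ml.contains q.1 then ml else ml.insert q.1 PySem.Dict.empty).modify q.1
          PySem.Dict.empty (fun d => d.insert c q.2)) ml).getD m PySem.Dict.empty).values).foldl (· + ·) 0
        = (log.foldl (fun t q => t.insert q.1 (t.getD q.1 0 + q.2)) t).getD m 0) ∧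
     (∀ m k, ((log.foldl (fun ml q =>
        (if ml.contains q.1 then ml else ml.insert q.1 PySem.Dict.empty).modify q.1
          PySem.Dict.empty (fun d => d.insert c q.2)) ml).getD m PySem.Dict.empty).contains k = true → S k ∨ k = c)) := by
  induction log with
  | nil => intro ml t h1 h2 h3 h4 _ _; exact ⟨h1, h2, h3, h4⟩
  | cons q rest ih =>
    intro ml t h1 h2 h3 h4 h5 h6
    simp only [List.foldl_cons]
    have hq : (ml.getD q.1 PySem.Dict.empty).contains c = false := h6 q List.mem_cons_self
    have hceq : ml.contains q.1 = t.contains q.1 := by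
      by_cases hm : q.1 ∈ t.keys
      · rw [(PySem.Dict.contains_iff_mem_keys t q.1).mpr hm,
          (PySem.Dict.contains_iff_mem_keys ml q.1).mpr (h1 ▸ hm)]
      · have a1 : ml.contains q.1 = false := by
          by_contra hh
          exact hm (h1 ▸ (PySem.Dict.contains_iff_mem_keys ml q.1).mp (by simpa using hh))
        have a2 : t.contains q.1 = false := by
          by_contra hh
          exact hm ((PySem.Dict.contains_iff_mem_keys t q.1).mp (by simpa using hh))
        rw [a1, a2]
    have hkt : (t.insert q.1 (t.getD q.1 0 + q.2)).keys
        = if ml.contains q.1 then t.keys else t.keys ++ [q.1] := by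
      by_cases h : ml.contains q.1 = true
      · rw [if_pos h, PySem.Dict.keys_insert_of_contains _ _ (hceq ▸ h)]
      · have h' : ml.contains q.1 = false := by simpa using h
        rw [if_neg (by simp [h']), PySem.Dict.keys_insert_of_not_contains _ _ (hceq ▸ h')]
    apply ih
    · rw [stepA_keys, hkt, h1]
    · rw [stepA_keys]
      by_cases h : ml.contains q.1 = true
      · rwa [if_pos h]
      · have h' : ml.contains q.1 = false := by simpa using h
        rw [if_neg (by simp [h'])]
        apply List.Nodup.append h2 (List.nodup_singleton _)
        simp only [List.disjoint_singleton]
        intro hmem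
        exact absurd ((PySem.Dict.contains_iff_mem_keys ml q.1).mpr hmem) (by simp [h'])
    · intro m
      by_cases hm : m = q.1
      · subst hm
        rw [stepA_getD_self, sum_values_insert_fresh _ _ _ hq, h3,
          PySem.Dict.getD_insert_self]
      · rw [stepA_getD_ne _ _ _ _ _ hm, PySem.Dict.getD_insert_of_ne _ _ _ hm, h3]
    · intro m k hk
      by_cases hm : m = q.1
      · subst hm
        rw [stepA_getD_self] at hk
        rcases (by simpa [PySem.Dict.contains_insert] using hk : k = c ∨ _) with h | h
        · exact Or.inr h
        · exact h4 _ _ h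
      · exact h4 m k (by rwa [stepA_getD_ne _ _ _ _ _ hm] at hk)
    · simpa using h5.of_cons
    · intro q' hq'
      have hmem : q'.1 ∈ rest.map Prod.fst := List.mem_map_of_mem hq'
      have hnotin : q.1 ∉ rest.map Prod.fst := by
        simp only [List.map_cons, List.nodup_cons] at h5; exact h5.1
      have hne : q'.1 ≠ q.1 := fun e => hnotin (e ▸ hmem)
      rw [stepA_getD_ne _ _ _ _ _ hne]
      exact h6 q' (List.mem_cons_of_mem _ hq')

lemma outer_inv (data : List (String × List (String × Int))) :
    ∀ (S : String → Prop) (ml : PySem.Dict String (PySem.Dict String Int)) (t : PySem.Dict String Int),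
    ml.keys = t.keys →
    ml.keys.Nodup →
    (∀ m, ((ml.getD m PySem.Dict.empty).values).foldl (· + ·) 0 = t.getD m 0) →
    (∀ m k, (ml.getD m PySem.Dict.empty).contains k = true → S k) →
    (data.map Prod.fst).Nodup →
    (∀ p ∈ data, (p.2.map Prod.fst).Nodup) →
    (∀ p ∈ data, ¬ S p.1) →
    ((data.foldl (fun ml p =>
        p.2.foldl (fun ml q =>
          (if ml.contains q.1 then ml else ml.insert q.1 PySem.Dict.empty).modify q.1
            PySem.Dict.empty (fun d => d.insert p.1 q.2)) ml) ml).keys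
      = (data.foldl (fun t p => p.2.foldl (fun t q => t.insert q.1 (t.getD q.1 0 + q.2)) t) t).keys ∧
     (data.foldl (fun ml p =>
        p.2.foldl (fun ml q =>
          (if ml.contains q.1 then ml else ml.insert q.1 PySem.Dict.empty).modify q.1
            PySem.Dict.empty (fun d => d.insert p.1 q.2)) ml) ml).keys.Nodup ∧
     (∀ m, (((data.foldl (fun ml p =>
        p.2.foldl (fun ml q =>
          (if ml.contains q.1 then ml else ml.insert q.1 PySem.Dict.empty).modify q.1
            PySem.Dict.empty (fun d => d.insert p.1 q.2)) ml) ml).getD m PySem.Dict.empty).values).foldl (· + ·) 0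
        = (data.foldl (fun t p => p.2.foldl (fun t q => t.insert q.1 (t.getD q.1 0 + q.2)) t) t).getD m 0)) := by
  induction data with
  | nil => intro S ml t h1 h2 h3 _ _ _ _; exact ⟨h1, h2, h3⟩
  | cons p rest ih =>
    intro S ml t h1 h2 h3 h4 h5 h6 h7
    simp only [List.foldl_cons]
    have hSc : ¬ S p.1 := h7 p List.mem_cons_self
    have hfresh : ∀ q ∈ p.2, (ml.getD q.1 PySem.Dict.empty).contains p.1 = false := by
      intro q _
      by_contra hh
      exact hSc (h4 q.1 p.1 (by simpa using hh))
    obtain ⟨g1, g2, g3, g4⟩ := inner_inv p.1 p.2 (fun k => S k ∨ k = p.1) ml t h1 h2 h3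
      (fun m k hk => Or.inl (Or.inl (h4 m k hk))) (h6 p List.mem_cons_self) hfresh
    have g4' : ∀ m k, (((p.2.foldl (fun ml q =>
        (if ml.contains q.1 then ml else ml.insert q.1 PySem.Dict.empty).modify q.1
          PySem.Dict.empty (fun d => d.insert p.1 q.2)) ml)).getD m PySem.Dict.empty).contains k = true
        → (fun k => S k ∨ k = p.1) k := by
      intro m k hk
      rcases g4 m k hk with h | h
      · exact h
      · exact Or.inr h
    have hnotin : p.1 ∉ rest.map Prod.fst := by
      simp only [List.map_cons, List.nodup_cons] at h5; exact h5.1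
    apply ih (fun k => S k ∨ k = p.1) _ _ g1 g2 g3 g4'
    · simpa using h5.of_cons
    · intro p' hp'; exact h6 p' (List.mem_cons_of_mem _ hp')
    · intro p' hp'
      rintro (h | h)
      · exact h7 p' (List.mem_cons_of_mem _ hp') h
      · exact hnotin (h ▸ List.mem_map_of_mem hp')

-- ===== VERDICT (by name: the statement is the Claim_ definition above) =====
theorem mostCases_spec : Claim_equal_mostCases := by
  intro data _ hpre
  obtain ⟨hnd, hin⟩ := hpre
  show mostCases data = mostCases_alt data
  unfold mostCases mostCases_alt getMonthlyCases
  dsimp only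
  obtain ⟨g1, g2, g3⟩ := outer_inv data (fun _ => False) PySem.Dict.empty PySem.Dict.empty
    (by simp) (by simp)
    (by intro m; simp [PySem.Dict.getD_empty]; rfl)
    (by intro m k hk; simp [PySem.Dict.getD_empty, PySem.Dict.contains_empty] at hk)
    hnd hin (by simp)
  have hndt : (data.foldl (fun t p => p.2.foldl (fun t q => t.insert q.1 (t.getD q.1 0 + q.2)) t)
      (PySem.Dict.empty : PySem.Dict String Int)).keys.Nodup := g1 ▸ g2
  rw [PySem.Dict.items_eq_map_keys _ g2 PySem.Dict.empty,
      PySem.Dict.items_eq_map_keys _ hndt 0,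
      List.foldl_map, List.foldl_map, g1]
  congr 1
  funext acc k
  simp only [pvReduceAdd_eq_foldl, g3]
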